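-- pv_equiv track=rewrite | github.com/alanngo/PythonSummerClass | jun21.py | t9
-- ===== SOURCE A (Python) =====
-- def t9(original):
--     map = {
--     'abc': '2',
--     'def': '3',
--     'ghi' : '4',
--     'jkl': '5',
--     'mno': '6',
--     'pqrs': '7',
--     'tuv': '8',
--     'wxyz': '9',
--     " ": '0'
--     }
--     string = ""
--     for char in original:
--         for str in map.keys():
--             if char in str:
--                 char_num = map[str]
--                 string += char_num
--                 break
--     return string
-- ===== SOURCE B (Python) =====
-- def _digit(c):
--     if c == ' ':
--         return '0'
--     if 'a' <= c <= 'z':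
--         i = ord(c) - ord('a')
--         if i < 15:
--             d = 2 + i // 3
--         elif i < 19:
--             d = 7
--         elif i < 22:
--             d = 8
--         else:
--             d = 9
--         return str(d)
--     return ''
--
-- def t9(original):
--     return ''.join(_digit(c) for c in original)
-- ===== Notes on version B (the rewrite author's own statement) =====
-- stated objective: alternative
-- what changed: B drops the group->digit dictionary entirely: it classifies each character arithmetically (digit = 2 + (ord(c)-ord('a'))//3 with fix-ups for the 4-letter keys pqrs and wxyz, '0' for space, empty for anything else) and joins the per-character digits in one pass, instead of A's per-character scan over nine key strings.
import Mathlib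
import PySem

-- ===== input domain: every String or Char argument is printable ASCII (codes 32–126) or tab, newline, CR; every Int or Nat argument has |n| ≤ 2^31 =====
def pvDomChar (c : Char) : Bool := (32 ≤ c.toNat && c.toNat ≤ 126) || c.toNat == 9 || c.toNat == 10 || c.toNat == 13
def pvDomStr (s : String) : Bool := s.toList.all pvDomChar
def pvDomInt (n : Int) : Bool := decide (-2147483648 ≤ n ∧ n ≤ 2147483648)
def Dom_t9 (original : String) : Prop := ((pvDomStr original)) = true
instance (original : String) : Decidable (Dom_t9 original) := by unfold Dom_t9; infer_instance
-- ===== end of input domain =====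

-- B replaces A's dictionary and per-character scan over the nine key strings by a purely
-- arithmetic classification of each character (2 + (code-97)/3 with fix-ups for the
-- 4-letter keys), joined in one pass (alternative algorithm, no lookup structure).

-- ===== PORT A =====
-- the dict literal `map` of A (keys in insertion order), as an association list
def t9Map : List (String × String) :=
  [("abc", "2"), ("def", "3"), ("ghi", "4"), ("jkl", "5"), ("mno", "6"),
   ("pqrs", "7"), ("tuv", "8"), ("wxyz", "9"), (" ", "0")]

-- the inner `for str in map.keys(): if char in str: string += map[str]; break`
def t9Inner (char : Char) (string : List Char) : List (String × String) → List Char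
  | [] => string
  | (s, d) :: rest =>
      if char ∈ s.toList then string ++ d.toList else t9Inner char string rest

def t9 (original : String) : String :=
  String.ofList (original.toList.foldl (fun string char => t9Inner char string t9Map) [])

-- ===== PORT B =====
-- helper _digit of Source B: arithmetic classification, no table
def t9Digit (c : Char) : String :=
  if c = ' ' then "0"
  else if 'a' ≤ c ∧ c ≤ 'z' then
    let i : Int := (c.toNat : Int) - 97
    let d : Int :=
      if i < 15 then 2 + PySem.Int.floordiv i 3
      else if i < 19 then 7
      else if i < 22 then 8
      else 9
    PySem.Int.toStr d
  else ""

-- ''.join(_digit(c) for c in original)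
def t9_alt (original : String) : String :=
  PySem.Str.join "" (original.toList.map t9Digit)

-- ===== PRECONDITION & SPEC =====
def Spec_t9 (original : String) (out : String) : Prop := out = t9_alt original
instance (original : String) (out : String) : Decidable (Spec_t9 original out) := by unfold Spec_t9; infer_instance

-- ===== CLAIM (what is proved, stated in full; the proofs are below) =====
def Claim_equal_t9 : Prop := ∀ (original : String), Dom_t9 original → Spec_t9 original (t9 original)

-- ===== LEMMAS AND PROOFS =====

-- the inner loop only appends to its accumulator
theorem t9Inner_acc (char : Char) (string : List Char) (m : List (String × String)) :
    t9Inner char string m = string ++ t9Inner char [] m := by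
  induction m with
  | nil => simp [t9Inner]
  | cons p rest ih =>
      obtain ⟨s, d⟩ := p
      by_cases h : char ∈ s.toList <;> simp [t9Inner, h, ih]

-- per-character agreement: A's first matching group yields B's arithmetic digit
-- (checked for every code point the domain admits; both sides are closed computations)
set_option maxRecDepth 8192 in
theorem t9_char_eq : ∀ n : Nat, n < 127 →
    t9Inner (Char.ofNat n) [] t9Map = (t9Digit (Char.ofNat n)).toList := by
  decide

theorem t9_char_eq' (c : Char) (h : pvDomChar c = true) :
    t9Inner c [] t9Map = (t9Digit c).toList := by
  have hb : c.toNat < 127 := by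
    simp [pvDomChar] at h
    omega
  have := t9_char_eq c.toNat hb
  rwa [Char.ofNat_toNat c] at this

-- empty-separator join is concatenation
theorem join_nil_eq_flatten (parts : List (List Char)) :
    PySem.Chars.join [] parts = parts.flatten := by
  induction parts with
  | nil => simp [pysem]
  | cons a rest ih =>
      cases rest with
      | nil => simp [pysem]
      | cons b r =>
          rw [PySem.Chars.join_cons_cons]
          simp_all

-- the outer loop of A accumulates the arithmetic digits of B
theorem t9_fold_eq (l : List Char) (acc : List Char) (h : ∀ c ∈ l, pvDomChar c = true) :
    l.foldl (fun string char => t9Inner char string t9Map) acc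
      = acc ++ (l.map (fun c => (t9Digit c).toList)).flatten := by
  induction l generalizing acc with
  | nil => simp
  | cons c rest ih =>
      simp only [List.foldl, List.map, List.flatten]
      rw [ih _ (fun x hx => h x (List.mem_cons_of_mem _ hx)),
          t9Inner_acc, t9_char_eq' c (h c List.mem_cons_self), List.append_assoc]
      rfl

-- ===== VERDICT (by name: the statement is the Claim_ definition above) =====
theorem t9_spec : Claim_equal_t9 := by
  intro original hdom
  unfold Spec_t9 t9 t9_alt
  apply String.ext
  have h : ∀ c ∈ original.toList, pvDomChar c = true := by
    simpa [Dom_t9, pvDomStr, List.all_eq_true] using hdom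
  rw [t9_fold_eq _ _ h]
  simp [pysem, join_nil_eq_flatten, List.map_map, Function.comp_def, String.toList_ofList]
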